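-- pv_equiv track=rewrite | github.com/Tosakanoneko/Tic-Tac-Toe | ai.py | legal_judge
-- ===== SOURCE A (Python) =====
-- def legal_judge(now_board, fore_board):
--     legal = True
--     start_illegal_x, start_illegal_y = None, None
--     end_illegal_x, end_illegal_y = None, None
--     for row in range(3):
--         for col in range(3):
--             if now_board[row][col] != fore_board[row][col]:
--                 if now_board[row][col] != " " and fore_board[row][col] == " ":
--                     start_illegal_x, start_illegal_y = col, row
--                     continue
--                 if fore_board[row][col] != " " and now_board[row][col] == " ":
--                     legal = False
--                     end_illegal_x, end_illegal_y = col, row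
--                     continue
--     return legal, (start_illegal_x, start_illegal_y, end_illegal_x, end_illegal_y)
-- ===== SOURCE B (Python) =====
-- def legal_judge(now_board, fore_board):
--     def kind(i):
--         n = now_board[i // 3][i % 3]
--         f = fore_board[i // 3][i % 3]
--         if n != " " and f == " ":
--             return 1
--         if f != " " and n == " ":
--             return -1
--         return 0
--     start = next((i for i in range(8, -1, -1) if kind(i) == 1), None)
--     end = next((i for i in range(8, -1, -1) if kind(i) == -1), None)
--     sx, sy = (start % 3, start // 3) if start is not None else (None, None)
--     ex, ey = (end % 3, end // 3) if end is not None else (None, None)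
--     return end is None, (sx, sy, ex, ey)
-- ===== Notes on version B (the rewrite author's own statement) =====
-- stated objective: alternative
-- what changed: Replaces A's forward row/col double loop that overwrites five mutable state variables (last-wins) with a backward first-match search over the flattened cell indices 8..0: a kind() classifier per flattened index, next() on a reversed range for each of the two events, and divmod to recover (col,row); legality is just 'no vanished cell found'.
import Mathlib
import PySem

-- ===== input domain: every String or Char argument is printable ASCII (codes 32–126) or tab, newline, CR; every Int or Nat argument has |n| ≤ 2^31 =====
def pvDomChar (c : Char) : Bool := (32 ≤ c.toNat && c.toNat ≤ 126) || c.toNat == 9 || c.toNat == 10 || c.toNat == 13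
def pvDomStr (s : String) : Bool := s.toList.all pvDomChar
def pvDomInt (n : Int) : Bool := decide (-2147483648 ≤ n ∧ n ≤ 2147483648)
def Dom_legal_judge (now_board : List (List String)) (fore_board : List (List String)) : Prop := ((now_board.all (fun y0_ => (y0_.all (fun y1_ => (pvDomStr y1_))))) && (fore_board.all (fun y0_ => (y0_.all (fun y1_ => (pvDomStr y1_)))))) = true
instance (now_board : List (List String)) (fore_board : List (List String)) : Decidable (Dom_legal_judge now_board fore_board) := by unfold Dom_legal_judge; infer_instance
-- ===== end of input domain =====

-- B replaces A's forward nested-loop scan with mutable last-wins state by a backward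
-- first-match search over the flattened cell indices 8..0 (divmod recovers row/col):
-- a different traversal order and decomposition, same cost.

-- board[row][col]; used under Pre_ (all indices in range), so the defaults never matter
def pvCell (b : List (List String)) (row col : Int) : String :=
  PySem.List.pyGetD (PySem.List.pyGetD b row []) col ""

-- ===== PORT A =====
def legal_judge (now_board : List (List String)) (fore_board : List (List String)) : Bool × (Option Int × Option Int × Option Int × Option Int) :=
  (PySem.List.pyRange 0 3 1).foldl (fun s row =>
    (PySem.List.pyRange 0 3 1).foldl (fun s col =>
      if pvCell now_board row col ≠ pvCell fore_board row col then
        if pvCell now_board row col ≠ " " ∧ pvCell fore_board row col = " " then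
          (s.1, some col, some row, s.2.2.2)
        else if pvCell fore_board row col ≠ " " ∧ pvCell now_board row col = " " then
          (false, s.2.1, s.2.2.1, some col, some row)
        else s
      else s) s)
    (true, none, none, none, none)

-- ===== PORT B =====
-- B's inner helper kind(i): classify flattened cell i as appeared (1), vanished (-1), other (0)
def pvKind (now_board fore_board : List (List String)) (i : Int) : Int :=
  if pvCell now_board (PySem.Int.floordiv i 3) (PySem.Int.mod i 3) ≠ " " ∧
     pvCell fore_board (PySem.Int.floordiv i 3) (PySem.Int.mod i 3) = " " then 1
  else if pvCell fore_board (PySem.Int.floordiv i 3) (PySem.Int.mod i 3) ≠ " " ∧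
     pvCell now_board (PySem.Int.floordiv i 3) (PySem.Int.mod i 3) = " " then -1
  else 0

def legal_judge_alt (now_board : List (List String)) (fore_board : List (List String)) : Bool × (Option Int × Option Int × Option Int × Option Int) :=
  let rng := PySem.List.pyRange 8 (-1) (-1)
  let start := rng.find? (fun i => pvKind now_board fore_board i == 1)
  let stop := rng.find? (fun i => pvKind now_board fore_board i == -1)
  let se : Option Int × Option Int :=
    match start with
    | some i => (some (PySem.Int.mod i 3), some (PySem.Int.floordiv i 3))
    | none => (none, none)
  let ee : Option Int × Option Int :=
    match stop with
    | some i => (some (PySem.Int.mod i 3), some (PySem.Int.floordiv i 3))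
    | none => (none, none)
  (stop.isNone, se.1, se.2, ee.1, ee.2)

-- ===== PRECONDITION & SPEC =====
-- Pre_: the Python A indexes rows 0..2 and, in each of those rows, columns 0..2 of both
-- boards; it raises IndexError otherwise (and B raises there too).
def Pre_legal_judge (now_board : List (List String)) (fore_board : List (List String)) : Prop :=
  3 ≤ now_board.length ∧ 3 ≤ fore_board.length ∧
  (∀ r ∈ now_board.take 3, 3 ≤ r.length) ∧ (∀ r ∈ fore_board.take 3, 3 ≤ r.length)
instance (now_board : List (List String)) (fore_board : List (List String)) : Decidable (Pre_legal_judge now_board fore_board) := by unfold Pre_legal_judge; infer_instance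

def pvWitness_legal_judge : List (List String) × List (List String) :=
  ([["X", " ", " "], [" ", "O", " "], [" ", " ", " "]],
   [[" ", " ", " "], [" ", "O", " "], [" ", " ", " "]])

def Spec_legal_judge (now_board : List (List String)) (fore_board : List (List String)) (out : Bool × (Option Int × Option Int × Option Int × Option Int)) : Prop := out = legal_judge_alt now_board fore_board
instance (now_board : List (List String)) (fore_board : List (List String)) (out : Bool × (Option Int × Option Int × Option Int × Option Int)) : Decidable (Spec_legal_judge now_board fore_board out) := by unfold Spec_legal_judge; infer_instance

-- ===== CLAIM (what is proved, stated in full; the proofs are below) =====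
def Claim_equal_legal_judge : Prop := ∀ (now_board : List (List String)) (fore_board : List (List String)), Dom_legal_judge now_board fore_board → Pre_legal_judge now_board fore_board → Spec_legal_judge now_board fore_board (legal_judge now_board fore_board)

-- ===== LEMMAS AND PROOFS =====

-- a generic cell: (row, col, now-string, fore-string)
def pvCells (now_board fore_board : List (List String)) : List (Int × Int × String × String) :=
  [(0, 0, pvCell now_board 0 0, pvCell fore_board 0 0),
   (0, 1, pvCell now_board 0 1, pvCell fore_board 0 1),
   (0, 2, pvCell now_board 0 2, pvCell fore_board 0 2),
   (1, 0, pvCell now_board 1 0, pvCell fore_board 1 0),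
   (1, 1, pvCell now_board 1 1, pvCell fore_board 1 1),
   (1, 2, pvCell now_board 1 2, pvCell fore_board 1 2),
   (2, 0, pvCell now_board 2 0, pvCell fore_board 2 0),
   (2, 1, pvCell now_board 2 1, pvCell fore_board 2 1),
   (2, 2, pvCell now_board 2 2, pvCell fore_board 2 2)]

def pvStep (s : Bool × (Option Int × Option Int × Option Int × Option Int))
    (c : Int × Int × String × String) : Bool × (Option Int × Option Int × Option Int × Option Int) :=
  if c.2.2.1 ≠ c.2.2.2 then
    if c.2.2.1 ≠ " " ∧ c.2.2.2 = " " then (s.1, some c.2.1, some c.1, s.2.2.2)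
    else if c.2.2.2 ≠ " " ∧ c.2.2.1 = " " then (false, s.2.1, s.2.2.1, some c.2.1, some c.1)
    else s
  else s

def pvCondA (c : Int × Int × String × String) : Bool := decide (c.2.2.1 ≠ " " ∧ c.2.2.2 = " ")
def pvCondB (c : Int × Int × String × String) : Bool := decide (c.2.2.2 ≠ " " ∧ c.2.2.1 = " ")

def pvApp (l : List (Int × Int × String × String)) : List (Int × Int) :=
  l.flatMap (fun c => if pvCondA c then [(c.2.1, c.1)] else [])

def pvVan (l : List (Int × Int × String × String)) : List (Int × Int) :=
  l.flatMap (fun c => if pvCondB c then [(c.2.1, c.1)] else [])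

def pvLast (xs : List (Int × Int)) (d : Option Int × Option Int) : Option Int × Option Int :=
  match xs.getLast? with
  | some p => (some p.1, some p.2)
  | none => d

lemma pvLast_cons (p : Int × Int) (xs : List (Int × Int)) (d : Option Int × Option Int) :
    pvLast (p :: xs) d = pvLast xs (some p.1, some p.2) := by
  unfold pvLast
  cases h : xs.getLast? with
  | none => simp [List.getLast?_cons, List.getLast?_eq_none_iff.mp h]
  | some q => simp [List.getLast?_cons, h]

lemma pv_fold_inv (l : List (Int × Int × String × String))
    (s : Bool × (Option Int × Option Int × Option Int × Option Int)) :
    l.foldl pvStep s =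
      (s.1 && (pvVan l).isEmpty,
       (pvLast (pvApp l) (s.2.1, s.2.2.1)).1,
       (pvLast (pvApp l) (s.2.1, s.2.2.1)).2,
       (pvLast (pvVan l) (s.2.2.2.1, s.2.2.2.2)).1,
       (pvLast (pvVan l) (s.2.2.2.1, s.2.2.2.2)).2) := by
  induction l generalizing s with
  | nil => simp [pvVan, pvApp, pvLast]
  | cons c l ih =>
    obtain ⟨row, col, n, f⟩ := c
    by_cases ha : n ≠ " " ∧ f = " "
    · have hnf : n ≠ f := by rintro rfl; exact ha.1 ha.2
      have hb : ¬ (f ≠ " " ∧ n = " ") := by rintro ⟨h1, _⟩; exact h1 ha.2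
      have hstep : pvStep s (row, col, n, f) = (s.1, some col, some row, s.2.2.2) := by
        simp [pvStep, ha]
      rw [List.foldl_cons, hstep, ih]
      simp [pvApp, pvVan, pvCondA, pvCondB, ha, pvLast_cons]
    · by_cases hb : f ≠ " " ∧ n = " "
      · obtain ⟨hf, hn⟩ := hb
        have hb : f ≠ " " ∧ n = " " := ⟨hf, hn⟩
        subst hn
        have hstep : pvStep s (row, col, " ", f) = (false, s.2.1, s.2.2.1, some col, some row) := by
          have h2 : " " ≠ f := fun h => hf h.symm
          simp [pvStep, hf, h2]
        rw [List.foldl_cons, hstep, ih]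
        simp [pvApp, pvVan, pvCondA, pvCondB, hb, pvLast_cons]
      · have hstep : pvStep s (row, col, n, f) = s := by
          unfold pvStep; simp only; split_ifs with hx hpa hpb <;> first | rfl | exact absurd hpa ha | exact absurd hpb hb
        rw [List.foldl_cons, hstep, ih]
        simp [pvApp, pvVan, pvCondA, pvCondB, ha, hb]

lemma pvRange3 : PySem.List.pyRange 0 3 1 = [0, 1, 2] := by decide

lemma pvA_eq (now_board fore_board : List (List String)) :
    legal_judge now_board fore_board =
      (pvCells now_board fore_board).foldl pvStep (true, none, none, none, none) := by
  unfold legal_judge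
  rw [pvRange3]
  rfl

-- getLast? over a filtering flatMap = first match scanning from the right
lemma pvGetLast_flatMap {α β : Type} (l : List α) (p : α → Bool) (g : α → β) :
    (l.flatMap (fun c => if p c then [g c] else [])).getLast? = (l.reverse.find? p).map g := by
  induction l with
  | nil => rfl
  | cons c l ih =>
    rw [List.flatMap_cons, List.reverse_cons, List.getLast?_append, List.find?_append, ih]
    cases h : l.reverse.find? p <;> cases hp : p c <;> simp [List.find?, hp]

lemma pvIsEmpty_flatMap {α β : Type} (l : List α) (p : α → Bool) (g : α → β) :
    (l.flatMap (fun c => if p c then [g c] else [])).isEmpty = (l.reverse.find? p).isNone := by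
  induction l with
  | nil => rfl
  | cons c l ih =>
    rw [List.flatMap_cons, List.reverse_cons, List.find?_append]
    cases hp : p c <;> cases h : l.reverse.find? p <;>
      simp_all [List.find?, Option.or]

-- per-cell correspondence between B's kind classification and the two conditions
lemma pvFind_cons {α : Type} (p : α → Bool) (a : α) (l : List α) :
    (a :: l).find? p = if p a then some a else l.find? p := by
  cases h : p a <;> simp [h]

lemma pvKind_one (now_board fore_board : List (List String)) (i : Int) :
    (pvKind now_board fore_board i == 1) =
      pvCondA (PySem.Int.floordiv i 3, PySem.Int.mod i 3,
        pvCell now_board (PySem.Int.floordiv i 3) (PySem.Int.mod i 3),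
        pvCell fore_board (PySem.Int.floordiv i 3) (PySem.Int.mod i 3)) := by
  unfold pvKind pvCondA
  split_ifs with h1 h2 <;> simp_all

lemma pvKind_negone (now_board fore_board : List (List String)) (i : Int) :
    (pvKind now_board fore_board i == -1) =
      pvCondB (PySem.Int.floordiv i 3, PySem.Int.mod i 3,
        pvCell now_board (PySem.Int.floordiv i 3) (PySem.Int.mod i 3),
        pvCell fore_board (PySem.Int.floordiv i 3) (PySem.Int.mod i 3)) := by
  unfold pvKind pvCondB
  split_ifs with h1 h2 <;> simp_all

def pvIdx : List Int := [8, 7, 6, 5, 4, 3, 2, 1, 0]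

set_option maxHeartbeats 1000000 in
lemma pvFindA_eq (now_board fore_board : List (List String)) :
    (match pvIdx.find? (fun i => pvKind now_board fore_board i == 1) with
      | some i => ((some (PySem.Int.mod i 3) : Option Int), (some (PySem.Int.floordiv i 3) : Option Int))
      | none => (none, none)) =
    (match ((pvCells now_board fore_board).reverse.find? pvCondA).map
        (fun c => ((c.2.1 : Int), (c.1 : Int))) with
      | some p => ((some p.1 : Option Int), (some p.2 : Option Int))
      | none => (none, none)) := by
  have h0 : PySem.Int.floordiv 0 3 = 0 ∧ PySem.Int.mod 0 3 = 0 := by decide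
  have h1 : PySem.Int.floordiv 1 3 = 0 ∧ PySem.Int.mod 1 3 = 1 := by decide
  have h2 : PySem.Int.floordiv 2 3 = 0 ∧ PySem.Int.mod 2 3 = 2 := by decide
  have h3 : PySem.Int.floordiv 3 3 = 1 ∧ PySem.Int.mod 3 3 = 0 := by decide
  have h4 : PySem.Int.floordiv 4 3 = 1 ∧ PySem.Int.mod 4 3 = 1 := by decide
  have h5 : PySem.Int.floordiv 5 3 = 1 ∧ PySem.Int.mod 5 3 = 2 := by decide
  have h6 : PySem.Int.floordiv 6 3 = 2 ∧ PySem.Int.mod 6 3 = 0 := by decide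
  have h7 : PySem.Int.floordiv 7 3 = 2 ∧ PySem.Int.mod 7 3 = 1 := by decide
  have h8 : PySem.Int.floordiv 8 3 = 2 ∧ PySem.Int.mod 8 3 = 2 := by decide
  simp only [pvIdx, pvFind_cons, List.find?_nil, pvKind_one, pvCells, List.reverse_cons,
    List.reverse_nil, List.nil_append, List.cons_append,
    h0.1, h0.2, h1.1, h1.2, h2.1, h2.2, h3.1, h3.2, h4.1, h4.2,
    h5.1, h5.2, h6.1, h6.2, h7.1, h7.2, h8.1, h8.2]
  split_ifs <;> rfl

set_option maxHeartbeats 1000000 in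
lemma pvFindB_eq (now_board fore_board : List (List String)) :
    (match pvIdx.find? (fun i => pvKind now_board fore_board i == -1) with
      | some i => ((some (PySem.Int.mod i 3) : Option Int), (some (PySem.Int.floordiv i 3) : Option Int))
      | none => (none, none)) =
    (match ((pvCells now_board fore_board).reverse.find? pvCondB).map
        (fun c => ((c.2.1 : Int), (c.1 : Int))) with
      | some p => ((some p.1 : Option Int), (some p.2 : Option Int))
      | none => (none, none)) := by
  have h0 : PySem.Int.floordiv 0 3 = 0 ∧ PySem.Int.mod 0 3 = 0 := by decide
  have h1 : PySem.Int.floordiv 1 3 = 0 ∧ PySem.Int.mod 1 3 = 1 := by decide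
  have h2 : PySem.Int.floordiv 2 3 = 0 ∧ PySem.Int.mod 2 3 = 2 := by decide
  have h3 : PySem.Int.floordiv 3 3 = 1 ∧ PySem.Int.mod 3 3 = 0 := by decide
  have h4 : PySem.Int.floordiv 4 3 = 1 ∧ PySem.Int.mod 4 3 = 1 := by decide
  have h5 : PySem.Int.floordiv 5 3 = 1 ∧ PySem.Int.mod 5 3 = 2 := by decide
  have h6 : PySem.Int.floordiv 6 3 = 2 ∧ PySem.Int.mod 6 3 = 0 := by decide
  have h7 : PySem.Int.floordiv 7 3 = 2 ∧ PySem.Int.mod 7 3 = 1 := by decide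
  have h8 : PySem.Int.floordiv 8 3 = 2 ∧ PySem.Int.mod 8 3 = 2 := by decide
  simp only [pvIdx, pvFind_cons, List.find?_nil, pvKind_negone, pvCells, List.reverse_cons,
    List.reverse_nil, List.nil_append, List.cons_append,
    h0.1, h0.2, h1.1, h1.2, h2.1, h2.2, h3.1, h3.2, h4.1, h4.2,
    h5.1, h5.2, h6.1, h6.2, h7.1, h7.2, h8.1, h8.2]
  split_ifs <;> rfl

set_option maxHeartbeats 1000000 in
lemma pvB_eq (now_board fore_board : List (List String)) :
    legal_judge_alt now_board fore_board =
      ((pvVan (pvCells now_board fore_board)).isEmpty,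
       (pvLast (pvApp (pvCells now_board fore_board)) (none, none)).1,
       (pvLast (pvApp (pvCells now_board fore_board)) (none, none)).2,
       (pvLast (pvVan (pvCells now_board fore_board)) (none, none)).1,
       (pvLast (pvVan (pvCells now_board fore_board)) (none, none)).2) := by
  have hB : legal_judge_alt now_board fore_board =
      (((pvIdx.find? (fun i => pvKind now_board fore_board i == -1)).isNone),
       ((match pvIdx.find? (fun i => pvKind now_board fore_board i == 1) with
         | some i => ((some (PySem.Int.mod i 3) : Option Int), (some (PySem.Int.floordiv i 3) : Option Int))
         | none => (none, none)) : Option Int × Option Int).1,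
       ((match pvIdx.find? (fun i => pvKind now_board fore_board i == 1) with
         | some i => ((some (PySem.Int.mod i 3) : Option Int), (some (PySem.Int.floordiv i 3) : Option Int))
         | none => (none, none)) : Option Int × Option Int).2,
       ((match pvIdx.find? (fun i => pvKind now_board fore_board i == -1) with
         | some i => ((some (PySem.Int.mod i 3) : Option Int), (some (PySem.Int.floordiv i 3) : Option Int))
         | none => (none, none)) : Option Int × Option Int).1,
       ((match pvIdx.find? (fun i => pvKind now_board fore_board i == -1) with
         | some i => ((some (PySem.Int.mod i 3) : Option Int), (some (PySem.Int.floordiv i 3) : Option Int))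
         | none => (none, none)) : Option Int × Option Int).2) := by
    have hr : PySem.List.pyRange 8 (-1) (-1) = pvIdx := by decide
    unfold legal_judge_alt
    rw [hr]
  rw [hB, pvFindA_eq, pvFindB_eq]
  unfold pvApp pvVan pvLast
  rw [pvGetLast_flatMap _ pvCondA (fun c => ((c.2.1 : Int), (c.1 : Int))),
      pvGetLast_flatMap _ pvCondB (fun c => ((c.2.1 : Int), (c.1 : Int))),
      pvIsEmpty_flatMap _ pvCondB (fun c => ((c.2.1 : Int), (c.1 : Int)))]
  have hNone : (pvIdx.find? (fun i => pvKind now_board fore_board i == -1)).isNone =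
      (((pvCells now_board fore_board).reverse.find? pvCondB).map
        (fun c => ((c.2.1 : Int), (c.1 : Int)))).isNone := by
    have := pvFindB_eq now_board fore_board
    cases hx : pvIdx.find? (fun i => pvKind now_board fore_board i == -1) <;>
      cases hy : ((pvCells now_board fore_board).reverse.find? pvCondB).map
        (fun c => ((c.2.1 : Int), (c.1 : Int))) <;> simp_all
  rw [hNone, Option.isNone_map]

-- ===== VERDICT (by name: the statement is the Claim_ definition above) =====
theorem legal_judge_spec : Claim_equal_legal_judge := by
  intro now_board fore_board _ _
  unfold Spec_legal_judge
  rw [pvA_eq, pvB_eq, pv_fold_inv]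
  simp
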